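-- pv_equiv track=rewrite | github.com/zepben/load-synthesiser | src/load_synthesiser/db/readings.py | encode_7bit_long
-- ===== SOURCE A (Python) =====
-- from typing import Generator, List
--
-- def encode_zigzag(val: int) -> int:
--     return (val << 1) ^ (val >> 63)
--
-- def encode_7bit_long(val: int) -> List[str]:
--     ret = []
--     val = encode_zigzag(val)
--     while True:
--         lower_7_bits = val & 0x7f
--         val = val >> 7
--         if val != 0:
--             lower_7_bits = lower_7_bits | 128
--
--         ret.append(f'uint:8={lower_7_bits}')
--
--         if val <= 0:
--             break
--     return ret
-- ===== SOURCE B (Python) =====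
-- def encode_zigzag(val: int) -> int:
--     return (val << 1) ^ (val >> 63)
--
-- def encode_7bit_long(val):
--     v = encode_zigzag(val)
--     n = max(1, (v.bit_length() + 6) // 7)
--     out = []
--     for i in range(n):
--         chunk = (v >> (7 * i)) & 0x7f
--         if i < n - 1:
--             chunk |= 128
--         out.append(f'uint:8={chunk}')
--     return out
-- ===== Notes on version B (the rewrite author's own statement) =====
-- stated objective: alternative
-- what changed: Replaces the mutate-until-zero while loop with precomputing the byte count n = max(1,(bit_length+6)//7) of the zigzag value and extracting each 7-bit chunk positionally by shift index, setting the continuation bit on all but the last chunk.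
import Mathlib
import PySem

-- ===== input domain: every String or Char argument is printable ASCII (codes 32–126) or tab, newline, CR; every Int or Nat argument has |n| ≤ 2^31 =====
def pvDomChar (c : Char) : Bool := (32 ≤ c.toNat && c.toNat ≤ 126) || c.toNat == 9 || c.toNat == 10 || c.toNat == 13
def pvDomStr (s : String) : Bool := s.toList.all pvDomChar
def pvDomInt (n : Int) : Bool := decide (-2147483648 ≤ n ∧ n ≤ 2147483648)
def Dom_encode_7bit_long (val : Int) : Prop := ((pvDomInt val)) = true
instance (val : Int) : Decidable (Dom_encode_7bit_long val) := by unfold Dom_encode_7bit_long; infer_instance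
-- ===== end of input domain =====

-- B replaces A's mutate-until-zero while loop by precomputing the byte count from the
-- zigzag value's bit_length and extracting each 7-bit chunk positionally (alternative decomposition).

-- ===== PORT A =====
def encode_zigzag (val : Int) : Int :=
  PySem.Int.bxor (val <<< (1 : Nat)) (val >>> (63 : Nat))

-- termination helper for the while loop: cited by name in decreasing_by
theorem pvShift7_toNat_lt (v : Int) (h : ¬ v >>> (7 : Nat) ≤ 0) :
    (v >>> (7 : Nat)).toNat < v.toNat := by
  cases v with
  | ofNat m =>
    have e : (Int.ofNat m) >>> (7 : Nat) = Int.ofNat (m >>> 7) := rfl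
    rw [e] at h ⊢
    have hd : m >>> 7 = m / 128 := by rw [Nat.shiftRight_eq_div_pow]
    have h1 : 0 < m >>> 7 := by
      by_contra hc
      apply h
      have hz : m >>> 7 = 0 := by omega
      rw [hz]
      decide
    show (m >>> 7) < m
    omega
  | negSucc m =>
    exact absurd (Int.le_of_lt (Int.negSucc_lt_zero _)) h

def encode7Loop (val : Int) : List String :=
  let lower_7_bits := PySem.Int.band val 0x7f
  let val2 := val >>> (7 : Nat)
  let lower2 := if val2 ≠ 0 then PySem.Int.bor lower_7_bits 128 else lower_7_bits
  let entry := "uint:8=" ++ PySem.Int.toStr lower2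
  if h : val2 ≤ 0 then [entry]
  else entry :: encode7Loop val2
termination_by val.toNat
decreasing_by exact pvShift7_toNat_lt val h

def encode_7bit_long (val : Int) : List String :=
  encode7Loop (encode_zigzag val)

-- ===== PORT B =====
def encode_zigzag_alt (val : Int) : Int :=
  PySem.Int.bxor (val <<< (1 : Nat)) (val >>> (63 : Nat))

def encode_7bit_long_alt (val : Int) : List String :=
  let v := encode_zigzag_alt val
  let n := max 1 ((PySem.Int.bitLength v + 6) / 7)
  (List.range n).map (fun (i : Nat) =>
    let chunk := PySem.Int.band (v >>> (7 * i)) 0x7f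
    let chunk2 := if i < n - 1 then PySem.Int.bor chunk 128 else chunk
    "uint:8=" ++ PySem.Int.toStr chunk2)

-- ===== PRECONDITION & SPEC =====
def Spec_encode_7bit_long (val : Int) (out : List String) : Prop := out = encode_7bit_long_alt val
instance (val : Int) (out : List String) : Decidable (Spec_encode_7bit_long val out) := by unfold Spec_encode_7bit_long; infer_instance

-- ===== CLAIM (what is proved, stated in full; the proofs are below) =====
def Claim_equal_encode_7bit_long : Prop := ∀ (val : Int), Dom_encode_7bit_long val → Spec_encode_7bit_long val (encode_7bit_long val)

-- ===== LEMMAS AND PROOFS =====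

def pvN (m : Nat) : Nat := max 1 ((PySem.Int.bitLength (m : Int) + 6) / 7)

theorem pvBL_small (m : Nat) (h : m < 128) : PySem.Int.bitLength (m : Int) ≤ 7 := by
  by_contra hc
  have hne : (m : Int) ≠ 0 := by
    intro h0
    have : m = 0 := by exact_mod_cast h0
    subst this
    simp [PySem.Int.bitLength_zero] at hc
  have hle := PySem.Int.two_pow_bitLength_le (m : Int) hne
  rw [Int.natAbs_natCast] at hle
  have : (2:Nat) ^ 7 ≤ 2 ^ (PySem.Int.bitLength (m : Int) - 1) :=
    Nat.pow_le_pow_right (by omega) (by omega)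
  omega

theorem pvBL_pos (m : Nat) (h : 0 < m) : 1 ≤ PySem.Int.bitLength (m : Int) := by
  by_contra hc
  have := PySem.Int.lt_two_pow_bitLength (m : Int)
  rw [Int.natAbs_natCast] at this
  have hz : PySem.Int.bitLength (m : Int) = 0 := by omega
  rw [hz] at this
  omega

theorem pvBL_step (m : Nat) (h : 128 ≤ m) :
    PySem.Int.bitLength (m : Int) = PySem.Int.bitLength ((m >>> 7 : Nat) : Int) + 7 := by
  have e : m >>> 7 = m / 2 / 2 / 2 / 2 / 2 / 2 / 2 := by
    rw [Nat.shiftRight_eq_div_pow]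
    omega
  rw [e,
    PySem.Int.bitLength_natCast (show 0 < m by omega),
    PySem.Int.bitLength_natCast (show 0 < m / 2 by omega),
    PySem.Int.bitLength_natCast (show 0 < m / 2 / 2 by omega),
    PySem.Int.bitLength_natCast (show 0 < m / 2 / 2 / 2 by omega),
    PySem.Int.bitLength_natCast (show 0 < m / 2 / 2 / 2 / 2 by omega),
    PySem.Int.bitLength_natCast (show 0 < m / 2 / 2 / 2 / 2 / 2 by omega),
    PySem.Int.bitLength_natCast (show 0 < m / 2 / 2 / 2 / 2 / 2 / 2 by omega)]

theorem pvKey (m : Nat) : encode7Loop (m : Int) =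
    (List.range (pvN m)).map (fun i =>
      "uint:8=" ++ PySem.Int.toStr
        (if i < pvN m - 1 then PySem.Int.bor (PySem.Int.band ((m : Int) >>> (7 * i)) 0x7f) 128
         else PySem.Int.band ((m : Int) >>> (7 * i)) 0x7f)) := by
  induction m using Nat.strong_induction_on with
  | _ m ih =>
  rw [encode7Loop]
  have hcast : ((m : Int) >>> (7 : Nat)) = ((m >>> 7 : Nat) : Int) := rfl
  have hd : m >>> 7 = m / 128 := by rw [Nat.shiftRight_eq_div_pow]
  by_cases h : m < 128
  · have h0 : m >>> 7 = 0 := by omega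
    have hN : pvN m = 1 := by
      have := pvBL_small m h
      unfold pvN
      omega
    rw [hN]
    simp [hcast, h0, List.range_succ]
  · have hm' : 0 < m >>> 7 := by omega
    have hlt : m >>> 7 < m := by omega
    have hbl := pvBL_step m (by omega)
    have hbl' := pvBL_pos (m >>> 7) hm'
    have hN1 : 1 ≤ pvN (m >>> 7) := by unfold pvN; omega
    have hN : pvN m = pvN (m >>> 7) + 1 := by
      unfold pvN
      rw [hbl]
      rw [Nat.max_eq_right (by omega), Nat.max_eq_right (by omega)]
      omega
    have hne : ((m >>> 7 : Nat) : Int) ≠ 0 := by exact_mod_cast Nat.pos_iff_ne_zero.mp hm'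
    have hnle : ¬ ((m >>> 7 : Nat) : Int) ≤ 0 := by exact_mod_cast Nat.not_le.mpr hm'
    simp only [hcast, hne, dif_neg hnle, ne_eq, not_false_eq_true, ite_true]
    rw [ih (m >>> 7) hlt, hN, List.range_succ_eq_map, List.map_cons, List.map_map]
    refine congrArg₂ List.cons ?_ ?_
    · rw [show ((m : Int) >>> (7 * 0 : Nat)) = (m : Int) by norm_num,
        if_pos (show 0 < pvN (m >>> 7) + 1 - 1 by omega)]
    · refine List.map_congr_left ?_
      intro i hi
      have hi' : i < pvN (m >>> 7) := List.mem_range.mp hi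
      have hsh : ((m : Int) >>> (7 * (i + 1) : Nat)) = (((m >>> 7 : Nat) : Int) >>> (7 * i : Nat)) := by
        have e1 : ((m : Int) >>> (7 * (i + 1) : Nat)) = ((m >>> (7 * (i + 1)) : Nat) : Int) := rfl
        have e2 : (((m >>> 7 : Nat) : Int) >>> (7 * i : Nat)) = (((m >>> 7) >>> (7 * i) : Nat) : Int) := rfl
        rw [e1, e2, show 7 * (i + 1) = 7 + 7 * i by ring, Nat.shiftRight_add]
      simp only [Function.comp_apply, Nat.succ_eq_add_one, hsh]
      by_cases hc : i < pvN (m >>> 7) - 1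
      · rw [if_pos hc, if_pos (show i + 1 < pvN (m >>> 7) + 1 - 1 by omega)]
      · rw [if_neg hc, if_neg (show ¬ (i + 1 < pvN (m >>> 7) + 1 - 1) by omega)]

theorem pvZig_nonneg (val : Int) (h1 : -2147483648 ≤ val) (h2 : val ≤ 2147483648) :
    0 ≤ encode_zigzag val := by
  unfold encode_zigzag
  cases val with
  | ofNat k =>
    have hk : k ≤ 2147483648 := by exact_mod_cast (show ((k : Nat) : Int) ≤ 2147483648 from h2)
    have e : (Int.ofNat k) >>> (63 : Nat) = Int.ofNat (k >>> 63) := rfl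
    have h0 : k >>> 63 = 0 := by
      have : k >>> 63 = k / 2 ^ 63 := Nat.shiftRight_eq_div_pow k 63
      rw [this]
      exact Nat.div_eq_of_lt (by omega)
    rw [e, h0]
    rw [show Int.ofNat 0 = 0 from rfl, PySem.Int.bxor_zero]
    rw [show (Int.ofNat k) <<< (1 : Nat) = Int.ofNat (k <<< 1) from rfl]
    exact Int.natCast_nonneg _
  | negSucc k =>
    have hk : k ≤ 2147483647 := by
      rw [Int.negSucc_eq] at h1
      omega
    have e : (Int.negSucc k) >>> (63 : Nat) = Int.negSucc (k >>> 63) := rfl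
    have h0 : k >>> 63 = 0 := by
      have : k >>> 63 = k / 2 ^ 63 := Nat.shiftRight_eq_div_pow k 63
      rw [this]
      exact Nat.div_eq_of_lt (by omega)
    rw [e, h0]
    rw [show (Int.negSucc k) <<< (1 : Nat) = Int.negSucc ((k + 1) <<< 1 - 1) from rfl]
    have ha : ¬ (0 : Int) ≤ Int.negSucc ((k + 1) <<< 1 - 1) :=
      Int.not_le.mpr (Int.negSucc_lt_zero _)
    have hb : ¬ (0 : Int) ≤ Int.negSucc 0 := Int.not_le.mpr (Int.negSucc_lt_zero _)
    unfold PySem.Int.bxor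
    rw [if_neg ha, if_neg hb]
    exact Int.natCast_nonneg _

-- ===== VERDICT (by name: the statement is the Claim_ definition above) =====
theorem encode_7bit_long_spec : Claim_equal_encode_7bit_long := by
  intro val hdom
  have hd : -2147483648 ≤ val ∧ val ≤ 2147483648 := by
    simpa [Dom_encode_7bit_long, pvDomInt] using hdom
  have hz : 0 ≤ encode_zigzag val := pvZig_nonneg val hd.1 hd.2
  show encode_7bit_long val = encode_7bit_long_alt val
  obtain ⟨m, hm⟩ : ∃ m : Nat, (m : Int) = encode_zigzag val :=
    ⟨(encode_zigzag val).toNat, Int.toNat_of_nonneg hz⟩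
  unfold encode_7bit_long encode_7bit_long_alt
  rw [show encode_zigzag_alt val = encode_zigzag val from rfl, ← hm]
  simpa [pvN] using pvKey m
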